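-- pv_equiv track=rewrite | github.com/swjtu33059/dasanshixi | 文本预处理/extract.py | limitLength
-- ===== SOURCE A (Python) =====
-- def limitLength(ls, lmt):
--     if len(ls) == 0:
--         return ''
--     res_list = []
--     length = 0
--     for item in ls:
--         length = length + len(item)
--         if length <= lmt:
--             res_list.append(item)
--         else:
--             break
--     return ''.join(res_list)
-- ===== SOURCE B (Python) =====
-- import bisect
-- from itertools import accumulate
--
--
-- def limitLength(ls, lmt):
--     prefix = list(accumulate(len(x) for x in ls))
--     cut = bisect.bisect_right(prefix, lmt)
--     return ''.join(ls[:cut])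
-- ===== Notes on version B (the rewrite author's own statement) =====
-- stated objective: idiomatic
-- what changed: Replaces the explicit accumulate-and-break loop with a prefix-sum table plus a bisect_right binary search for the cutoff index, then joins the list prefix; no empty-list special case.
import Mathlib
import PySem

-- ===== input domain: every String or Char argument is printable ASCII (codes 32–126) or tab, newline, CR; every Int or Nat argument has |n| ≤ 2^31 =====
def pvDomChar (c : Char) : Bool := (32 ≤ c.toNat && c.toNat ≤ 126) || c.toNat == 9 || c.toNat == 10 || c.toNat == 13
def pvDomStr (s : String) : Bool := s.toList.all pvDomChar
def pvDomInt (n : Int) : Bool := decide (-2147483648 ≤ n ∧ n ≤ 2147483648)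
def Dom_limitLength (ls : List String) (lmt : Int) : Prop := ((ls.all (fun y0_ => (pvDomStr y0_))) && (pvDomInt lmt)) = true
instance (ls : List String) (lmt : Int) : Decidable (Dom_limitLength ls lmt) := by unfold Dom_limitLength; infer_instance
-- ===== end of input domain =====

-- B replaces A's accumulate-and-break loop by a prefix-sum table plus a bisect_right
-- binary search for the cutoff index (same asymptotic cost; different decomposition).


-- ===== PORT A =====
-- the for-loop with its break: carries 'length' and stops at the first item overflowing lmt
def limAux : List String → Int → Int → List String
  | [], _, _ => []
  | item :: rest, length, lmt =>
    let length' := length + (PySem.Str.len item : Int)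
    if length' ≤ lmt then item :: limAux rest length' lmt else []

def limitLength (ls : List String) (lmt : Int) : String :=
  if ls.length = 0 then ""
  else PySem.Str.join "" (limAux ls 0 lmt)

-- ===== PORT B =====
-- itertools.accumulate(len(x) for x in ls)
def accLens : List String → Int → List Int
  | [], _ => []
  | s :: r, acc =>
    let a := acc + (PySem.Str.len s : Int)
    a :: accLens r a

-- bisect.bisect_right(xs, x): standard lo/hi binary search
def bisAux (xs : List Int) (x : Int) (lo hi : Nat) : Nat :=
  if _h : lo < hi then
    let mid := (lo + hi) / 2
    if x < xs.getD mid 0 then bisAux xs x lo mid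
    else bisAux xs x (mid + 1) hi
  else lo
termination_by hi - lo
decreasing_by all_goals omega

def limitLength_alt (ls : List String) (lmt : Int) : String :=
  let pre := accLens ls 0
  let cut := bisAux pre lmt 0 pre.length
  PySem.Str.join "" (ls.take cut)

-- ===== PRECONDITION & SPEC =====
def Spec_limitLength (ls : List String) (lmt : Int) (out : String) : Prop := out = limitLength_alt ls lmt
instance (ls : List String) (lmt : Int) (out : String) : Decidable (Spec_limitLength ls lmt out) := by unfold Spec_limitLength; infer_instance

-- ===== CLAIM (what is proved, stated in full; the proofs are below) =====
def Claim_equal_limitLength : Prop := ∀ (ls : List String) (lmt : Int), Dom_limitLength ls lmt → Spec_limitLength ls lmt (limitLength ls lmt)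

-- ===== LEMMAS AND PROOFS =====

theorem accLens_lb (ls : List String) (acc : Int) : ∀ b ∈ accLens ls acc, acc ≤ b := by
  induction ls generalizing acc with
  | nil => simp [accLens]
  | cons s r ih =>
    intro b hb
    simp only [accLens, List.mem_cons] at hb
    rcases hb with h | h
    · subst h; have : (0:Int) ≤ (PySem.Str.len s : Int) := Int.natCast_nonneg _
      omega
    · have := ih (acc + (PySem.Str.len s : Int)) b h
      have : (0:Int) ≤ (PySem.Str.len s : Int) := Int.natCast_nonneg _
      omega

theorem accLens_pairwise (ls : List String) (acc : Int) :
    (accLens ls acc).Pairwise (· ≤ ·) := by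
  induction ls generalizing acc with
  | nil => simp [accLens]
  | cons s r ih =>
    simp only [accLens, List.pairwise_cons]
    exact ⟨accLens_lb r _, ih _⟩

theorem accLens_mono (ls : List String) (acc : Int) (i j : Nat) (hij : i ≤ j)
    (hj : j < (accLens ls acc).length) :
    (accLens ls acc).getD i 0 ≤ (accLens ls acc).getD j 0 := by
  rcases Nat.lt_or_ge i j with h | h
  · have := (List.pairwise_iff_getElem).1 (accLens_pairwise ls acc) i j (by omega) hj h
    rwa [List.getD_eq_getElem _ _ (by omega), List.getD_eq_getElem _ _ hj]
  · have : i = j := by omega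
    subst this; rfl

-- characterisation of the binary search on a monotone list
theorem bisAux_spec (xs : List Int) (x : Int)
    (hmono : ∀ i j, i ≤ j → j < xs.length → xs.getD i 0 ≤ xs.getD j 0) :
    ∀ lo hi, lo ≤ hi → hi ≤ xs.length →
    (∀ i, i < lo → xs.getD i 0 ≤ x) →
    (∀ i, hi ≤ i → i < xs.length → x < xs.getD i 0) →
    (bisAux xs x lo hi ≤ xs.length ∧
      (∀ i, i < bisAux xs x lo hi → xs.getD i 0 ≤ x) ∧
      (∀ i, bisAux xs x lo hi ≤ i → i < xs.length → x < xs.getD i 0)) := by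
  intro lo hi
  induction hn : hi - lo using Nat.strong_induction_on generalizing lo hi with
  | _ n ih =>
  intro hle hhi hlo hup
  rw [bisAux]
  by_cases h : lo < hi
  · simp only [dif_pos h]
    set mid := (lo + hi) / 2 with hmid
    have hm1 : lo ≤ mid := by omega
    have hm2 : mid < hi := by omega
    by_cases hx : x < xs.getD mid 0
    · simp only [if_pos hx]
      exact ih (mid - lo) (by omega) lo mid rfl hm1 (by omega) hlo
        (fun i hi1 hi2 => lt_of_lt_of_le hx (hmono mid i hi1 hi2))
    · simp only [if_neg hx]
      refine ih (hi - (mid + 1)) (by omega) (mid + 1) hi rfl (by omega) hhi ?_ hup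
      intro i hi1
      exact le_trans (hmono i mid (by omega) (by omega)) (le_of_not_gt hx)
  · simp only [dif_neg h]
    have : lo = hi := by omega
    subst this
    exact ⟨hhi, hlo, hup⟩

-- the count of leading prefix sums ≤ lmt, as computed by takeWhile
theorem takeWhile_spec (x : Int) (xs : List Int) :
    (xs.takeWhile (fun a => a ≤ x)).length ≤ xs.length ∧
    (∀ i, i < (xs.takeWhile (fun a => a ≤ x)).length → xs.getD i 0 ≤ x) ∧
    ((xs.takeWhile (fun a => a ≤ x)).length < xs.length →
      ¬ (xs.getD (xs.takeWhile (fun a => a ≤ x)).length 0 ≤ x)) := by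
  induction xs with
  | nil => simp
  | cons a r ih =>
    by_cases h : a ≤ x
    · simp only [List.takeWhile_cons, h, decide_true, if_pos, List.length_cons]
      refine ⟨by simpa using ih.1, ?_, ?_⟩
      · intro i hi
        cases i with
        | zero => simpa using h
        | succ k => exact ih.2.1 k (by simpa using hi)
      · intro hlt
        simpa using ih.2.2 (by omega)
    · simp [h]

-- uniqueness: on a monotone list the binary search returns the takeWhile count
theorem bisAux_eq_takeWhile (xs : List Int) (x : Int)
    (hmono : ∀ i j, i ≤ j → j < xs.length → xs.getD i 0 ≤ xs.getD j 0) :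
    bisAux xs x 0 xs.length = (xs.takeWhile (fun a => a ≤ x)).length := by
  obtain ⟨hr1, hr2, hr3⟩ := bisAux_spec xs x hmono 0 xs.length (by omega) le_rfl
    (by omega) (by omega)
  obtain ⟨ht1, ht2, ht3⟩ := takeWhile_spec x xs
  set r := bisAux xs x 0 xs.length
  set t := (xs.takeWhile (fun a => a ≤ x)).length
  rcases Nat.lt_trichotomy r t with h | h | h
  · exact absurd (ht2 r h) (not_le.2 (hr3 r le_rfl (by omega)))
  · exact h
  · exact absurd (hr2 t h) (ht3 (by omega))

-- A's loop returns exactly the takeWhile-many first items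
theorem limAux_eq_take (ls : List String) (acc lmt : Int) :
    limAux ls acc lmt = ls.take ((accLens ls acc).takeWhile (fun a => a ≤ lmt)).length := by
  induction ls generalizing acc with
  | nil => rfl
  | cons s r ih =>
    simp only [limAux, accLens]
    by_cases h : acc + (s.length : Int) ≤ lmt
    · simp [PySem.Str.len_eq, h, ih]
    · simp [PySem.Str.len_eq, h]

-- ===== VERDICT (by name: the statement is the Claim_ definition above) =====
theorem limitLength_spec : Claim_equal_limitLength := by
  intro ls lmt _
  unfold Spec_limitLength limitLength limitLength_alt
  show (if ls.length = 0 then "" else PySem.Str.join "" (limAux ls 0 lmt))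
      = PySem.Str.join "" (List.take (bisAux (accLens ls 0) lmt 0 (accLens ls 0).length) ls)
  have hb := bisAux_eq_takeWhile (accLens ls 0) lmt (accLens_mono ls 0)
  rw [hb, ← limAux_eq_take]
  cases ls with
  | nil => rfl
  | cons s r => simp
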